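-- pv_equiv track=rewrite | github.com/Anton-Dahlstrom/Leetcode | 3523_make_array_non-decreasing.py | maximumPossibleSize
-- ===== SOURCE A (Python) =====
-- def maximumPossibleSize(nums: list[int]) -> int:
--     prev = -1
--     n = len(nums)
--     res = n
--     for i in range(n):
--         if nums[i] < prev:
--             res -= 1
--         else:
--             prev = nums[i]
--     return res
-- ===== SOURCE B (Python) =====
-- def maximumPossibleSize(nums: list[int]) -> int:
--     # Divide and conquer: an element is kept iff it is >= the max of everything
--     # before it (with -1 as the initial bound).  solve(lo, hi, bound) counts the
--     # kept elements of nums[lo:hi] given that bound; the right half's bound is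
--     # the left half's maximum, computed independently with max().
--     def solve(lo: int, hi: int, bound: int) -> int:
--         if lo >= hi:
--             return 0
--         if hi - lo == 1:
--             return 1 if nums[lo] >= bound else 0
--         mid = (lo + hi) // 2
--         return solve(lo, mid, bound) + solve(mid, hi, max(bound, max(nums[lo:mid])))
--     return solve(0, len(nums), -1)
-- ===== Notes on version B (the rewrite author's own statement) =====
-- stated objective: alternative
-- what changed: Replaces A's single left-to-right scan with a running maximum by a divide-and-conquer recursion: the array is split in half, each half is counted recursively, and the right half's lower bound is obtained by an independent max() over the left half.
import Mathlib
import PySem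

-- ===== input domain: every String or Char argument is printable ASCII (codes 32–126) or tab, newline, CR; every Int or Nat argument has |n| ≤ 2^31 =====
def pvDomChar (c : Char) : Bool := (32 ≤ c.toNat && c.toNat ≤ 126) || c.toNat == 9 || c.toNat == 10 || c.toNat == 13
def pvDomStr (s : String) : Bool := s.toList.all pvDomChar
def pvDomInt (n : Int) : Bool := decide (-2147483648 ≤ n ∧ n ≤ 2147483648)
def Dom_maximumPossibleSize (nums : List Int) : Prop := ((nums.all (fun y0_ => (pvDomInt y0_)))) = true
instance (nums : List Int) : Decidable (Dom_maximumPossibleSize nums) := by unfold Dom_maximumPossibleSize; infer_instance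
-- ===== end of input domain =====

-- B counts the kept elements by divide and conquer (split in half, left half's max
-- becomes the right half's bound) instead of A's single running-max scan; an alternative decomposition, same result.

-- ===== PORT A =====
-- the for-loop of A: state (prev, res), one step per element
def pvGoA : List Int → Int → Int → Int
  | [], _, res => res
  | x :: xs, prev, res =>
      if x < prev then pvGoA xs prev (res - 1) else pvGoA xs x res

def maximumPossibleSize (nums : List Int) : Int :=
  pvGoA nums (-1) (nums.length : Int)

-- ===== PORT B =====
-- Python's max(l) on a nonempty list (l is nonempty at the call site in Source B)
def pvPyMax : List Int → Int
  | [] => 0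
  | y :: ys => ys.foldl max y

-- solve(lo, hi, bound) of Source B, carried as the sublist nums[lo:hi]
-- (mid - lo = (lo+hi)//2 - lo = (hi-lo)//2 = xs.length / 2; '//' here has nonnegative operands, so Nat '/' is exact)
def pvSolve (xs : List Int) (bound : Int) : Int :=
  match xs with
  | [] => 0
  | [x] => if bound ≤ x then 1 else 0
  | x :: y :: t =>
    let mid := (x :: y :: t).length / 2
    pvSolve ((x :: y :: t).take mid) bound +
      pvSolve ((x :: y :: t).drop mid) (max bound (pvPyMax ((x :: y :: t).take mid)))
termination_by xs.length
decreasing_by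
  · simp [List.length_take]; omega
  · simp; omega

def maximumPossibleSize_alt (nums : List Int) : Int :=
  pvSolve nums (-1)

-- ===== PRECONDITION & SPEC =====
def Spec_maximumPossibleSize (nums : List Int) (out : Int) : Prop := out = maximumPossibleSize_alt nums
instance (nums : List Int) (out : Int) : Decidable (Spec_maximumPossibleSize nums out) := by unfold Spec_maximumPossibleSize; infer_instance

-- ===== CLAIM (what is proved, stated in full; the proofs are below) =====
def Claim_equal_maximumPossibleSize : Prop := ∀ (nums : List Int), Dom_maximumPossibleSize nums → Spec_maximumPossibleSize nums (maximumPossibleSize nums)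

-- ===== LEMMAS AND PROOFS =====

-- the number of "kept" elements of xs given running max bound (the value A's loop computes)
def pvCnt : Int → List Int → Int
  | _, [] => 0
  | bound, x :: xs => (if bound ≤ x then 1 else 0) + pvCnt (max bound x) xs

theorem pvGoA_eq (xs : List Int) : ∀ (prev res : Int),
    pvGoA xs prev res = res - (xs.length : Int) + pvCnt prev xs := by
  induction xs with
  | nil => intro prev res; simp [pvGoA, pvCnt]
  | cons x xs ih =>
    intro prev res
    simp only [pvGoA, pvCnt, List.length_cons]
    by_cases h : x < prev
    · have hle : ¬ prev ≤ x := by omega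
      have hmax : max prev x = prev := by omega
      rw [if_pos h, if_neg hle, hmax, ih]
      push_cast; ring
    · have hle : prev ≤ x := by omega
      have hmax : max prev x = x := by omega
      rw [if_neg h, if_pos hle, hmax, ih]
      push_cast; ring

theorem pvCnt_append (l : List Int) : ∀ (r : List Int) (bound : Int),
    pvCnt bound (l ++ r) = pvCnt bound l + pvCnt (l.foldl max bound) r := by
  induction l with
  | nil => intro r bound; simp [pvCnt]
  | cons x l ih =>
    intro r bound
    simp only [List.cons_append, pvCnt, List.foldl_cons, ih]
    ring

theorem foldl_max_max (l : List Int) : ∀ (a y : Int),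
    l.foldl max (max a y) = max a (l.foldl max y) := by
  induction l with
  | nil => intro a y; simp
  | cons z l ih =>
    intro a y
    simp only [List.foldl_cons, max_assoc, ih]

theorem pvPyMax_eq (l : List Int) (hl : l ≠ []) (bound : Int) :
    max bound (pvPyMax l) = l.foldl max bound := by
  cases l with
  | nil => exact absurd rfl hl
  | cons y ys => simp only [pvPyMax, foldl_max_max, List.foldl_cons]

theorem pvSolve_eq (xs : List Int) (bound : Int) : pvSolve xs bound = pvCnt bound xs := by
  fun_induction pvSolve xs bound with
  | case1 => simp [pvCnt]
  | case2 => simp_all [pvCnt]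
  | case3 => simp_all [pvCnt]
  | case4 bound x y t mid ih1 ih2 =>
    have htake : (x :: y :: t).take mid ≠ [] := by
      intro h
      have := congrArg List.length h
      simp [mid] at this
    rw [ih1, ih2, pvPyMax_eq _ htake, ← pvCnt_append, List.take_append_drop]

-- ===== VERDICT (by name: the statement is the Claim_ definition above) =====
theorem maximumPossibleSize_spec : Claim_equal_maximumPossibleSize := by
  intro nums _
  show maximumPossibleSize nums = maximumPossibleSize_alt nums
  rw [maximumPossibleSize, maximumPossibleSize_alt, pvGoA_eq, pvSolve_eq]
  ring
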